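-- pv_equiv track=rewrite | github.com/andrew-sabin/GroupProject_CS362 | task.py | conv_endian
-- ===== SOURCE A (Python) =====
-- def endian_formatting(split_answer, endian, negative):
--     """This function properly formats the answer as a hex including
--     endian into account and adding spaces where needed."""
--     answer = ''
--     # If little edian reverse list
--     if endian == 'little':
--         split_answer.reverse()
--     # Format answer with characters properly grouped
--     for element in split_answer:
--         answer += element
--         answer += ' '
--     # Add negative if needed
--     if negative is True:
--         answer = '-' + answer
--     # Remove extra space added at end of string
--     answer = answer[:-1]
--     return answer
--
-- def endian_split(answer, endian, negative):
--     """Takes the hex and splits it into two characters per element in a list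
--     to allow for proper formating"""
--     split_answer = []
--     segment = ''
--     # Add each pair of characters as an element to the list
--     for i in range(len(answer)):
--         segment += answer[i]
--         if i % 2 != 0:
--             split_answer.append(segment)
--             segment = ''
--     return endian_formatting(split_answer, endian, negative)
--
-- def conv_endian(num, endian='big'):
--     # return None if endian is not big or little
--     if endian not in ['big', 'little']:
--         return None
--     negative = False
--     # Check if number is negative, flag it and make positive if so
--     if num < 0:
--         negative = True
--         num *= -1
--     # Return '0' if number is 0
--     if num == 0:
--         return '0'
--     else:
--         # convert to unformatted hex string
--         letters = ['A', 'B', 'C', 'D', 'E', 'F']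
--         answer = ''
--         new_answer = ''
--         while num != 0:
--             remainder = num % 16
--             if remainder < 10:
--                 answer += str(remainder)
--             else:
--                 answer += letters[remainder - 10]
--             num = num // 16
--     # add leading zero if needed
--     if len(answer) % 2 != 0:
--         answer += '0'
--     for char in reversed(answer):
--         new_answer += char
--     return endian_split(new_answer, endian, negative)
-- ===== SOURCE B (Python) =====
-- def conv_endian(num, endian='big'):
--     # byte-at-a-time: build 2-char segments directly, little-endian first
--     if endian not in ('big', 'little'):
--         return None
--     if num == 0:
--         return '0'
--     negative = num < 0
--     n = abs(num)
--     segs = []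
--     while n:
--         segs.append(format(n % 256, '02X'))
--         n //= 256
--     if endian == 'big':
--         segs.reverse()
--     out = ' '.join(segs)
--     return '-' + out if negative else out
-- ===== Notes on version B (the rewrite author's own statement) =====
-- stated objective: alternative
-- what changed: Replaces A's nibble-by-nibble hex-digit loop followed by a full string reverse and a separate index-parity pairing pass with a single byte-granular loop (n % 256 formatted as a 2-char segment, n //= 256) that yields the little-endian segment list directly, reversed once for big endian and joined.
import Mathlib
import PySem

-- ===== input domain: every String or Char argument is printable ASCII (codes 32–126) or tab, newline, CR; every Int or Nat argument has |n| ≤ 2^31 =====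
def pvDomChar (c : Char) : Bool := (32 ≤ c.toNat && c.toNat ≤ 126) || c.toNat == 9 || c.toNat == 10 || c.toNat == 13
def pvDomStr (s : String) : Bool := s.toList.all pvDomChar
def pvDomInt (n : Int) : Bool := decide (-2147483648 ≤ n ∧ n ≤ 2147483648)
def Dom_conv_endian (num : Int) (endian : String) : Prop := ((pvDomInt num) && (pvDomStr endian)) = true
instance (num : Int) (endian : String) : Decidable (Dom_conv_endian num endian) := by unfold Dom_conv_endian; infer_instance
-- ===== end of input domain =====

-- B replaces A's nibble-by-nibble digit loop + full string reverse + index-parity pairing pass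
-- with a single byte-granular loop producing the 2-char segments directly (alternative decomposition).

-- ===== PORT A =====
def lettersA : List String := ["A", "B", "C", "D", "E", "F"]

-- str(remainder) for remainder < 10, else letters[remainder - 10]
def digitStrA (remainder : Int) : String :=
  if remainder < 10 then PySem.Int.toStr remainder
  else (PySem.List.pyGet? lettersA (remainder - 10)).getD ""

-- 'while num != 0: …'; at its only call site num > 0, so the loop runs over
-- nonnegative values, where Nat % and / coincide with Python's % and // — exact.
def convLoopA (num : Nat) (answer : String) : String :=
  if num = 0 then answer
  else convLoopA (num / 16) (answer ++ digitStrA ((num % 16 : Nat) : Int))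
termination_by num
decreasing_by exact Nat.div_lt_self (Nat.pos_of_ne_zero (by assumption)) (by norm_num)

-- 'for char in reversed(answer): new_answer += char'
def revLoopA (answer : String) : String :=
  answer.toList.reverse.foldl (fun s c => s ++ String.ofList [c]) ""

def endian_formatting (split_answer : List String) (endian : String) (negative : Bool) : String :=
  let sa := if endian == "little" then split_answer.reverse else split_answer
  let answer := sa.foldl (fun a e => a ++ e ++ " ") ""
  let answer := if negative then "-" ++ answer else answer
  -- answer[:-1]
  PySem.Str.slice answer none (some (-1))

-- 'for i in range(len(answer)): segment += answer[i] …'; i is always a valid index,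
-- so the loop is ported as a fold over the characters paired with their index (exact).
def endian_split (answer : String) (endian : String) (negative : Bool) : String :=
  let st := (answer.toList.zipIdx).foldl
    (fun (st : List String × String) p =>
      let segment := st.2 ++ String.ofList [p.1]
      if p.2 % 2 ≠ 0 then (st.1 ++ [segment], "") else (st.1, segment))
    ([], "")
  endian_formatting st.1 endian negative

def conv_endian (num : Int) (endian : String) : Option String :=
  if ¬ (endian == "big" || endian == "little") then none
  else
    let negative := decide (num < 0)
    let num := if num < 0 then num * (-1) else num
    if num = 0 then some "0"
    else
      let answer := convLoopA num.toNat ""   -- num > 0 here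
      let answer := if PySem.Int.mod (PySem.Str.len answer) 2 ≠ 0 then answer ++ "0" else answer
      let new_answer := revLoopA answer
      some (endian_split new_answer endian negative)

-- ===== PORT B =====
def hexCharsB : List Char := ['0','1','2','3','4','5','6','7','8','9','A','B','C','D','E','F']

-- format(b, '02X') for 0 ≤ b < 256: two upper-case hex digits, zero-padded — exact on that range
def hexByteB (b : Nat) : String :=
  String.ofList [hexCharsB.getD (b / 16) '0', hexCharsB.getD (b % 16) '0']

-- 'while n: segs.append(format(n % 256, "02X")); n //= 256' — the append loop builds
-- the same list front-to-back that this recursion produces.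
def segsB (n : Nat) : List String :=
  if n = 0 then [] else hexByteB (n % 256) :: segsB (n / 256)
termination_by n
decreasing_by exact Nat.div_lt_self (Nat.pos_of_ne_zero (by assumption)) (by norm_num)

def conv_endian_alt (num : Int) (endian : String) : Option String :=
  if ¬ (endian == "big" || endian == "little") then none
  else if num = 0 then some "0"
  else
    let negative := decide (num < 0)
    let segs := segsB num.natAbs
    let segs := if endian == "big" then segs.reverse else segs
    let out := PySem.Str.join " " segs
    some (if negative then "-" ++ out else out)

-- ===== PRECONDITION & SPEC =====
def Spec_conv_endian (num : Int) (endian : String) (out : Option String) : Prop := out = conv_endian_alt num endian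
instance (num : Int) (endian : String) (out : Option String) : Decidable (Spec_conv_endian num endian out) := by unfold Spec_conv_endian; infer_instance

-- ===== CLAIM (what is proved, stated in full; the proofs are below) =====
def Claim_equal_conv_endian : Prop := ∀ (num : Int) (endian : String), Dom_conv_endian num endian → Spec_conv_endian num endian (conv_endian num endian)

-- ===== LEMMAS AND PROOFS =====

-- canonical hex digit character
def hdig (r : Nat) : Char := hexCharsB.getD r '0'

-- little-endian digit list A's while loop appends
def dA (n : Nat) : List Char :=
  if n = 0 then [] else hdig (n % 16) :: dA (n / 16)
termination_by n
decreasing_by exact Nat.div_lt_self (Nat.pos_of_ne_zero (by assumption)) (by norm_num)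

lemma digitStrA_toList (r : Nat) (h : r < 16) : (digitStrA (r : Int)).toList = [hdig r] := by
  interval_cases r <;> decide

lemma convLoopA_toList (n : Nat) (acc : String) :
    (convLoopA n acc).toList = acc.toList ++ dA n := by
  induction n using Nat.strong_induction_on generalizing acc with
  | _ n ih =>
    rw [convLoopA, dA]
    by_cases h : n = 0
    · simp [h]
    · rw [if_neg h, if_neg h, ih (n / 16) (Nat.div_lt_self (Nat.pos_of_ne_zero h) (by norm_num))]
      rw [String.toList_append, digitStrA_toList (n % 16) (Nat.mod_lt n (by norm_num))]
      simp

lemma foldlChar_toList (l : List Char) (a : String) :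
    (l.foldl (fun s c => s ++ String.ofList [c]) a).toList = a.toList ++ l := by
  induction l generalizing a with
  | nil => simp
  | cons c l ih => simp [ih, String.toList_append]

lemma revLoopA_toList (s : String) : (revLoopA s).toList = s.toList.reverse := by
  rw [revLoopA, foldlChar_toList]; simp

-- A's padded-and-reversed digit string is the flattened big-endian byte segments
lemma hexByteB_toList (b : Nat) : (hexByteB b).toList = [hdig (b / 16), hdig (b % 16)] := by
  simp [hexByteB, hdig]

lemma segsB_ne_nil (n : Nat) (h : n ≠ 0) : segsB n ≠ [] := by
  rw [segsB]; simp [h]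

lemma segsB_mem_len (n : Nat) : ∀ s ∈ segsB n, s.toList.length = 2 := by
  induction n using Nat.strong_induction_on with
  | _ n ih =>
    rw [segsB]
    by_cases h : n = 0
    · simp [h]
    · rw [if_neg h]
      intro s hs
      rcases List.mem_cons.mp hs with rfl | hs
      · simp [hexByteB_toList]
      · exact ih (n / 256) (Nat.div_lt_self (Nat.pos_of_ne_zero h) (by norm_num)) s hs

lemma dA_two_step (n : Nat) (h : 256 ≤ n) :
    dA n = hdig (n % 256 % 16) :: hdig (n % 256 / 16) :: dA (n / 256) := by
  rw [dA, if_neg (by omega)]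
  nth_rewrite 1 [dA]
  rw [if_neg (by omega)]
  rw [show n % 16 = n % 256 % 16 from by omega, show n / 16 % 16 = n % 256 / 16 from by omega,
    show n / 16 / 16 = n / 256 from by omega]

lemma bigA_eq (n : Nat) :
    ((if (dA n).length % 2 ≠ 0 then dA n ++ ['0'] else dA n).reverse) =
      (((segsB n).reverse).map String.toList).flatten := by
  induction n using Nat.strong_induction_on with
  | _ n ih =>
    rcases Nat.lt_or_ge n 256 with hlt | hge
    · rcases Nat.eq_zero_or_pos n with rfl | hpos
      · simp [dA, segsB]
      · have hsegs : segsB n = [hexByteB n] := by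
          rw [segsB, if_neg (by omega)]
          rw [show n % 256 = n from by omega, show n / 256 = 0 from by omega, segsB, if_pos rfl]
        rcases Nat.lt_or_ge n 16 with h16 | h16
        · have hdA : dA n = [hdig n] := by
            rw [dA, if_neg (by omega), show n % 16 = n from by omega,
              show n / 16 = 0 from by omega, dA, if_pos rfl]
          rw [hdA, hsegs]
          simp [hexByteB_toList, show n / 16 = 0 from by omega, show n % 16 = n from by omega,
            show hdig 0 = '0' from rfl]
        · have hdA : dA n = [hdig (n % 16), hdig (n / 16)] := by
            rw [dA, if_neg (by omega)]
            nth_rewrite 1 [dA]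
            rw [if_neg (by omega), show n / 16 % 16 = n / 16 from by omega,
              show n / 16 / 16 = 0 from by omega, dA, if_pos rfl]
          rw [hdA, hsegs]
          simp [hexByteB_toList]
    · have hsegs : segsB n = hexByteB (n % 256) :: segsB (n / 256) := by
        rw [segsB, if_neg (by omega)]
      have ihl := ih (n / 256) (Nat.div_lt_self (by omega) (by norm_num))
      rw [dA_two_step n hge, hsegs]
      simp only [List.length_cons,
        show ∀ m : Nat, (m + 1 + 1) % 2 = m % 2 from fun m => by omega]
      by_cases hodd : (dA (n / 256)).length % 2 ≠ 0
      · rw [if_pos hodd] at ihl ⊢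
        simp only [List.cons_append, List.reverse_cons, List.map_cons,
          List.map_append, List.flatten_cons, List.flatten_append,
          List.map_reverse] at ihl ⊢
        simp [hexByteB_toList, ihl]
      · rw [if_neg hodd] at ihl ⊢
        simp only [List.reverse_cons, List.map_cons, List.map_append,
          List.flatten_cons, List.flatten_append, List.map_reverse] at ihl ⊢
        simp [hexByteB_toList, ihl]


-- the pairing fold reassembles a flattened list of 2-character strings
lemma pairFold (L : List String) (h : ∀ s ∈ L, s.toList.length = 2) (k : Nat) (hk : k % 2 = 0)
    (acc : List String) :
    (((L.map String.toList).flatten.zipIdx k).foldl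
      (fun (st : List String × String) p =>
        let segment := st.2 ++ String.ofList [p.1]
        if p.2 % 2 ≠ 0 then (st.1 ++ [segment], "") else (st.1, segment))
      (acc, "")) = (acc ++ L, "") := by
  induction L generalizing k acc with
  | nil => simp
  | cons s L ihL =>
    obtain ⟨a, b, hs⟩ := List.length_eq_two.mp (h s (by simp))
    have hk0 : ¬ (k % 2 ≠ 0) := by omega
    have hk1 : (k + 1) % 2 ≠ 0 := by omega
    rw [List.map_cons, List.flatten_cons, hs,
      show ([a, b] ++ (L.map String.toList).flatten) = a :: b :: (L.map String.toList).flatten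
        from rfl,
      List.zipIdx_cons, List.zipIdx_cons, List.foldl_cons, List.foldl_cons]
    simp only [if_neg hk0, if_pos hk1]
    have hseg : ("" ++ String.ofList [a]) ++ String.ofList [b] = s := by
      rw [String.ext_iff]; simp [String.toList_append, hs]
    rw [hseg, show k + 1 + 1 = k + 2 from rfl,
      ihL (fun t ht => h t (by simp [ht])) (k + 2) (by omega) (acc ++ [s])]
    simp

lemma foldlSp_toList (L : List String) (a0 : String) :
    (L.foldl (fun a e => a ++ e ++ " ") a0).toList
      = a0.toList ++ (L.map (fun e => e.toList ++ [' '])).flatten := by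
  induction L generalizing a0 with
  | nil => simp
  | cons s L ih =>
    rw [List.foldl_cons, ih]
    simp [String.toList_append]

lemma flatten_sp_ne_nil (M : List (List Char)) (h : M ≠ []) :
    (M.map (fun e => e ++ [' '])).flatten ≠ [] := by
  cases M with
  | nil => exact absurd rfl h
  | cons c M => simp

lemma dropLast_flatten_sp (M : List (List Char)) (h : M ≠ []) :
    ((M.map (fun e => e ++ [' '])).flatten).dropLast = PySem.Chars.join [' '] M := by
  induction M with
  | nil => exact absurd rfl h
  | cons c M ih =>
    cases M with
    | nil => simp [PySem.Chars.join_singleton]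
    | cons d M' =>
      have hne := flatten_sp_ne_nil (d :: M') (by simp)
      rw [List.map_cons, List.flatten_cons, PySem.Chars.join_cons_cons, ← ih (by simp)]
      simp only [List.map_cons, List.flatten_cons, List.append_assoc]
      rw [List.dropLast_append_of_ne_nil (by simp), List.dropLast_append_of_ne_nil (by simp)]

-- joined formatting: A's trailing-space fold + drop-last equals ' '.join
lemma formatting_eq (L : List String) (h : L ≠ []) (endian : String) (negative : Bool) :
    endian_formatting L endian negative =
      (let sa := if endian == "little" then L.reverse else L
       let out := PySem.Str.join " " sa
       if negative then "-" ++ out else out) := by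
  have key : ∀ (M : List String), M ≠ [] →
      PySem.Str.slice
        (if negative then "-" ++ (M.foldl (fun a e => a ++ e ++ " ") "")
         else (M.foldl (fun a e => a ++ e ++ " ") "")) none (some (-1))
      = (if negative then "-" ++ PySem.Str.join " " M else PySem.Str.join " " M) := by
    intro M hM
    have hMmap : M.map String.toList ≠ [] := by simp [hM]
    have hflat : (M.foldl (fun a e => a ++ e ++ " ") "").toList
        = ((M.map String.toList).map (fun e => e ++ [' '])).flatten := by
      rw [foldlSp_toList]
      simp [List.map_map, Function.comp_def]
    have hjoin : (PySem.Str.join " " M).toList = PySem.Chars.join [' '] (M.map String.toList) := by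
      rw [PySem.Str.toList_join]
      rfl
    cases negative with
    | false =>
      rw [if_neg (by simp), if_neg (by simp), String.ext_iff, PySem.Str.slice_to_neg_one,
        hflat, dropLast_flatten_sp _ hMmap, hjoin]
    | true =>
      rw [if_pos rfl, if_pos rfl, String.ext_iff, PySem.Str.slice_to_neg_one,
        String.toList_append, hflat,
        show ("-" : String).toList = ['-'] from rfl, List.singleton_append,
        List.dropLast_cons_of_ne_nil (flatten_sp_ne_nil _ hMmap),
        dropLast_flatten_sp _ hMmap, String.toList_append, hjoin]
      rfl
  rw [endian_formatting]
  by_cases hl : (endian == "little") = true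
  · simp only [hl, if_true]
    exact key L.reverse (by simp [h])
  · simp only [hl, if_false, Bool.false_eq_true]
    exact key L h

-- ===== VERDICT (by name: the statement is the Claim_ definition above) =====
lemma segsB_reverse_mem_len (n : Nat) : ∀ s ∈ (segsB n).reverse, s.toList.length = 2 :=
  fun s hs => segsB_mem_len n s (List.mem_reverse.mp hs)

lemma endian_split_eq (n : Nat) (s : String)
    (hs : s.toList = (((segsB n).reverse).map String.toList).flatten)
    (endian : String) (negative : Bool) :
    endian_split s endian negative = endian_formatting ((segsB n).reverse) endian negative := by
  rw [endian_split, hs, pairFold ((segsB n).reverse) (segsB_reverse_mem_len n) 0 rfl []]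
  simp

theorem conv_endian_spec : Claim_equal_conv_endian := by
  intro num endian _
  show conv_endian num endian = conv_endian_alt num endian
  rw [conv_endian, conv_endian_alt]
  by_cases hval : (endian == "big" || endian == "little") = true
  · have hguard : ¬(¬(endian == "big" || endian == "little") = true) := by simp [hval]
    rw [if_neg hguard, if_neg hguard]
    by_cases hz : num = 0
    · subst hz
      simp
    · have hnz' : (if num < 0 then num * (-1) else num) ≠ 0 := by split_ifs <;> omega
      rw [if_neg hnz', if_neg hz]
      have hnat : (if num < 0 then num * (-1) else num).toNat = num.natAbs := by
        split_ifs <;> omega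
      have hn0 : num.natAbs ≠ 0 := by omega
      have hans : (convLoopA (if num < 0 then num * (-1) else num).toNat "").toList
          = dA num.natAbs := by
        rw [hnat, convLoopA_toList]
        simp
      have hmod : ∀ k : Nat, PySem.Int.mod (k : Int) 2 = ((k % 2 : Nat) : Int) := by
        intro k
        simp [PySem.Int.mod, Int.fmod_eq_emod]
      have hpad : (if PySem.Int.mod
            (PySem.Str.len (convLoopA (if num < 0 then num * (-1) else num).toNat "")) 2 ≠ 0
          then convLoopA (if num < 0 then num * (-1) else num).toNat "" ++ "0"
          else convLoopA (if num < 0 then num * (-1) else num).toNat "").toList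
          = (if (dA num.natAbs).length % 2 ≠ 0
             then dA num.natAbs ++ ['0'] else dA num.natAbs) := by
        rw [PySem.Str.len_eq, hans, hmod]
        by_cases hodd : (dA num.natAbs).length % 2 ≠ 0
        · rw [if_pos (by exact_mod_cast by omega), if_pos hodd, String.toList_append, hans]
          rfl
        · rw [if_neg (by exact_mod_cast by omega), if_neg hodd, hans]
      have hnew : (revLoopA
          (if PySem.Int.mod
            (PySem.Str.len (convLoopA (if num < 0 then num * (-1) else num).toNat "")) 2 ≠ 0
          then convLoopA (if num < 0 then num * (-1) else num).toNat "" ++ "0"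
          else convLoopA (if num < 0 then num * (-1) else num).toNat "")).toList
          = (((segsB num.natAbs).reverse).map String.toList).flatten := by
        rw [revLoopA_toList, hpad, bigA_eq]
      simp only []
      rw [endian_split_eq num.natAbs _ hnew endian (decide (num < 0)),
        formatting_eq ((segsB num.natAbs).reverse) (by simp [segsB_ne_nil _ hn0]) endian
          (decide (num < 0))]
      by_cases hb : (endian == "big") = true
      · have hbe : endian = "big" := by simpa using hb
        subst hbe
        norm_num [show ("big" : String) ≠ "little" from by decide]
      · have hle : endian = "little" := by
          rcases Bool.or_eq_true_iff.mp hval with h1 | h1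
          · exact absurd h1 hb
          · simpa using h1
        subst hle
        norm_num [show ("little" : String) ≠ "big" from by decide, List.reverse_reverse]
  · rw [if_pos (by simpa using hval), if_pos (by simpa using hval)]
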